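-- pv_equiv track=rewrite | github.com/Roflz/IL_bot | actions/travel.py | _door_has_wall_on_side
-- ===== SOURCE A (Python) =====
-- def _door_has_wall_on_side(orient_a: int, orient_b: int, sides) -> bool:
--     """Check if the door has a wall on any of the specified sides."""
--     side_flags = {
--         "north": 2,
--         "east": 4,
--         "south": 8,
--         "west": 1
--     }
--
--     # Handle both single side and list of sides
--     if isinstance(sides, str):
--         sides = [sides]
--
--     for side in sides:
--         if side not in side_flags:
--             continue
--
--         flag = side_flags[side]
--         if (orient_a & flag) != 0 or (orient_b & flag) != 0:
--             return True  # Door has a wall on at least one of the sides being crossed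
--
--     return False  # Door has no walls on any of the sides being crossed
-- ===== SOURCE B (Python) =====
-- def _door_has_wall_on_side(orient_a: int, orient_b: int, sides) -> bool:
--     """Check if the door has a wall on any of the specified sides."""
--     side_flags = {
--         "north": 2,
--         "east": 4,
--         "south": 8,
--         "west": 1
--     }
--     if isinstance(sides, str):
--         sides = [sides]
--     mask = 0
--     for side in sides:
--         mask |= side_flags.get(side, 0)
--     return (orient_a & mask) != 0 or (orient_b & mask) != 0
-- ===== Notes on version B (the rewrite author's own statement) =====
-- stated objective: simpler
-- what changed: Instead of testing each side's flag separately with an early return, B ORs all recognized sides' flags into one mask and performs a single bitwise test per orientation at the end.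
import Mathlib
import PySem

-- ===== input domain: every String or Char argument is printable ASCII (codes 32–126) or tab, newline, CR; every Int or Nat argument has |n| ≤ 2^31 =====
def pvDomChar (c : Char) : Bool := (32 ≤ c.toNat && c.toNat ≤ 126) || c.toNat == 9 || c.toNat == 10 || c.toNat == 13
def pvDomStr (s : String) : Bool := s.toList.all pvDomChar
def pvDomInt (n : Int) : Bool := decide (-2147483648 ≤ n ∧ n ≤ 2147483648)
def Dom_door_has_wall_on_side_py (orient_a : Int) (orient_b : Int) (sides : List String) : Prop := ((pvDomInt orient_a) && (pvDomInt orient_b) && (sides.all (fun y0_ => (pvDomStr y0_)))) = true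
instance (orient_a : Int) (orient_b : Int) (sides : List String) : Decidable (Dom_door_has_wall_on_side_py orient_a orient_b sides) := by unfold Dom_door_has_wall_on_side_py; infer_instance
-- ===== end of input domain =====

-- B replaces A's per-side early-return loop by ORing all recognized flags into one mask and doing a single bitwise test per orientation at the end (same O(n) cost, simpler final check).


-- the side_flags dict literal shared by both Pythons
def pvSideFlags : PySem.Dict String Int :=
  PySem.Dict.mk [("north", 2), ("east", 4), ("south", 8), ("west", 1)]

-- ===== PORT A =====
-- A's for-loop with `continue` on unknown sides and early `return True`.
-- (`sides` is typed List String here, so Python's `isinstance(sides, str)` branch never fires.)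
def pvDoorLoopA (orient_a : Int) (orient_b : Int) : List String → Bool
  | [] => false
  | side :: rest =>
    if pvSideFlags.contains side = false then pvDoorLoopA orient_a orient_b rest
    else
      let flag := pvSideFlags.getD side 0
      if PySem.Int.band orient_a flag ≠ 0 ∨ PySem.Int.band orient_b flag ≠ 0 then true
      else pvDoorLoopA orient_a orient_b rest

def door_has_wall_on_side_py (orient_a : Int) (orient_b : Int) (sides : List String) : Bool :=
  pvDoorLoopA orient_a orient_b sides

-- ===== PORT B =====
def door_has_wall_on_side_py_alt (orient_a : Int) (orient_b : Int) (sides : List String) : Bool :=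
  let mask := sides.foldl (fun m side => PySem.Int.bor m (pvSideFlags.getD side 0)) 0
  (PySem.Int.band orient_a mask != 0) || (PySem.Int.band orient_b mask != 0)

-- ===== PRECONDITION & SPEC =====
def Spec_door_has_wall_on_side_py (orient_a : Int) (orient_b : Int) (sides : List String) (out : Bool) : Prop := out = door_has_wall_on_side_py_alt orient_a orient_b sides
instance (orient_a : Int) (orient_b : Int) (sides : List String) (out : Bool) : Decidable (Spec_door_has_wall_on_side_py orient_a orient_b sides out) := by unfold Spec_door_has_wall_on_side_py; infer_instance

-- ===== CLAIM (what is proved, stated in full; the proofs are below) =====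
def Claim_equal_door_has_wall_on_side_py : Prop := ∀ (orient_a : Int) (orient_b : Int) (sides : List String), Dom_door_has_wall_on_side_py orient_a orient_b sides → Spec_door_has_wall_on_side_py orient_a orient_b sides (door_has_wall_on_side_py orient_a orient_b sides)

-- ===== LEMMAS AND PROOFS =====

-- the flag a side contributes (0 for unrecognized sides), as a Nat
def pvFlagNat (s : String) : Nat :=
  if "north" = s then 2 else if "east" = s then 4 else if "south" = s then 8
  else if "west" = s then 1 else 0

-- bit i of x in Python's infinite two's complement
def pvHasBit (x : Int) (i : Nat) : Bool :=
  if 0 ≤ x then x.toNat.testBit i else !((-x - 1).toNat.testBit i)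

def pvMaskNat : List String → Nat
  | [] => 0
  | s :: rest => pvFlagNat s ||| pvMaskNat rest

lemma pvFlag_contains (s : String) :
    pvSideFlags.contains s = (pvFlagNat s != 0) := by
  unfold pvSideFlags pvFlagNat
  by_cases h1 : "north" = s <;> by_cases h2 : "east" = s <;> by_cases h3 : "south" = s <;>
    by_cases h4 : "west" = s <;> simp_all [PySem.Dict.contains_mk]

lemma pvFlag_getD (s : String) :
    pvSideFlags.getD s 0 = ((pvFlagNat s : Nat) : Int) := by
  unfold pvSideFlags pvFlagNat
  by_cases h1 : "north" = s <;> by_cases h2 : "east" = s <;> by_cases h3 : "south" = s <;>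
    by_cases h4 : "west" = s <;> simp_all [PySem.Dict.getD, PySem.Dict.get?]

lemma pvNat_and_ne_self_iff (m y : Nat) :
    m &&& y ≠ m ↔ ∃ i, m.testBit i = true ∧ y.testBit i = false := by
  constructor
  · intro h
    by_contra hall
    push Not at hall
    apply h
    apply Nat.eq_of_testBit_eq
    intro i
    rw [Nat.testBit_and]
    cases hm : m.testBit i with
    | false => simp
    | true => simp [hall i hm]
  · rintro ⟨i, hm, hy⟩ heq
    have := congrArg (fun n => n.testBit i) heq
    simp [Nat.testBit_and, hm, hy] at this

lemma pvBand_ne_iff (x : Int) (m : Nat) :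
    PySem.Int.band x (m : Int) ≠ 0 ↔ ∃ i, m.testBit i = true ∧ pvHasBit x i = true := by
  by_cases hx : 0 ≤ x
  · rw [PySem.Int.band_of_nonneg hx (Int.natCast_nonneg m)]
    simp only [Int.toNat_natCast]
    rw [Int.natCast_ne_zero]
    constructor
    · intro h
      obtain ⟨i, hi⟩ := Nat.exists_testBit_of_ne_zero h
      rw [Nat.testBit_and] at hi
      exact ⟨i, (Bool.and_eq_true _ _ ▸ hi).2, by simp [pvHasBit, hx, (Bool.and_eq_true _ _ ▸ hi).1]⟩
    · rintro ⟨i, hm, hb⟩ h0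
      have := congrArg (fun n => n.testBit i) h0
      simp only [pvHasBit, if_pos hx] at hb
      simp [Nat.testBit_and, hm, hb] at this
  · have hband : PySem.Int.band x (m : Int) = ((m - (m &&& (-x - 1).toNat) : Nat) : Int) := by
      unfold PySem.Int.band
      rw [if_neg hx, if_pos (Int.natCast_nonneg m)]
      simp
    rw [hband, Int.natCast_ne_zero]
    have hle : m &&& (-x - 1).toNat ≤ m := Nat.and_le_left
    constructor
    · intro h
      have : m &&& (-x - 1).toNat ≠ m := by omega
      obtain ⟨i, hm, hy⟩ := (pvNat_and_ne_self_iff m _).mp this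
      exact ⟨i, hm, by simp only [pvHasBit, if_neg hx, hy, Bool.not_false]⟩
    · rintro ⟨i, hm, hb⟩
      simp only [pvHasBit, if_neg hx, Bool.not_eq_true'] at hb
      have : m &&& (-x - 1).toNat ≠ m := (pvNat_and_ne_self_iff m _).mpr ⟨i, hm, by simpa using hb⟩
      omega

lemma pvMask_foldl (l : List String) (acc : Nat) :
    l.foldl (fun m side => PySem.Int.bor m (pvSideFlags.getD side 0)) (acc : Int)
      = ((acc ||| pvMaskNat l : Nat) : Int) := by
  induction l generalizing acc with
  | nil => simp [pvMaskNat]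
  | cons s rest ih =>
      rw [List.foldl_cons]
      have h : PySem.Int.bor (acc : Int) (pvSideFlags.getD s 0) = ((acc ||| pvFlagNat s : Nat) : Int) := by
        rw [pvFlag_getD, PySem.Int.bor_natCast]
      rw [h, ih (acc ||| pvFlagNat s)]
      simp only [pvMaskNat]
      congr 1
      rw [Nat.or_assoc]

lemma pvLoopA_iff (a b : Int) (l : List String) :
    pvDoorLoopA a b l = true ↔
      ∃ i, (pvMaskNat l).testBit i = true ∧ (pvHasBit a i = true ∨ pvHasBit b i = true) := by
  induction l with
  | nil => simp [pvDoorLoopA, pvMaskNat]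
  | cons s rest ih =>
      rw [pvDoorLoopA]
      rw [pvFlag_contains s, pvFlag_getD s]
      by_cases h0 : pvFlagNat s = 0
      · simp [pvMaskNat, h0, ih]
      · rw [if_neg (by simp [h0])]
        simp only []
        by_cases hc : PySem.Int.band a ((pvFlagNat s : Nat) : Int) ≠ 0 ∨ PySem.Int.band b ((pvFlagNat s : Nat) : Int) ≠ 0
        · simp only [if_pos hc]
          constructor
          · intro _
            rcases hc with hc | hc
            · obtain ⟨i, hbit, hx⟩ := (pvBand_ne_iff a (pvFlagNat s)).mp hc
              exact ⟨i, by simp [pvMaskNat, Nat.testBit_or, hbit], Or.inl hx⟩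
            · obtain ⟨i, hbit, hx⟩ := (pvBand_ne_iff b (pvFlagNat s)).mp hc
              exact ⟨i, by simp [pvMaskNat, Nat.testBit_or, hbit], Or.inr hx⟩
          · intro _; trivial
        · simp only [if_neg hc]
          push Not at hc
          obtain ⟨hca, hcb⟩ := hc
          rw [ih]
          constructor
          · rintro ⟨i, hbit, hx⟩
            exact ⟨i, by simp [pvMaskNat, Nat.testBit_or, hbit], hx⟩
          · rintro ⟨i, hbit, hx⟩
            simp only [pvMaskNat, Nat.testBit_or, Bool.or_eq_true] at hbit
            rcases hbit with hbit | hbit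
            · exfalso
              rcases hx with hx | hx
              · exact (pvBand_ne_iff a (pvFlagNat s)).mpr ⟨i, hbit, hx⟩ hca
              · exact (pvBand_ne_iff b (pvFlagNat s)).mpr ⟨i, hbit, hx⟩ hcb
            · exact ⟨i, hbit, hx⟩

-- ===== VERDICT (by name: the statement is the Claim_ definition above) =====
theorem door_has_wall_on_side_py_spec : Claim_equal_door_has_wall_on_side_py := by
  intro a b sides _
  unfold Spec_door_has_wall_on_side_py door_has_wall_on_side_py door_has_wall_on_side_py_alt
  have hmask := pvMask_foldl sides 0
  simp only [Nat.cast_zero] at hmask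
  rw [hmask]
  simp only [Nat.zero_or]
  rw [Bool.eq_iff_iff]
  rw [pvLoopA_iff]
  simp only [Bool.or_eq_true, bne_iff_ne]
  rw [pvBand_ne_iff a (pvMaskNat sides), pvBand_ne_iff b (pvMaskNat sides)]
  constructor
  · rintro ⟨i, hbit, hx | hx⟩
    · exact Or.inl ⟨i, hbit, hx⟩
    · exact Or.inr ⟨i, hbit, hx⟩
  · rintro (⟨i, hbit, hx⟩ | ⟨i, hbit, hx⟩)
    · exact ⟨i, hbit, Or.inl hx⟩
    · exact ⟨i, hbit, Or.inr hx⟩
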